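-- pv_equiv track=rewrite | github.com/jwuliger/speaker-diarization-transcriber | src/services/transcription_service.py | refine_speaker_tags
-- ===== SOURCE A (Python) =====
-- def refine_speaker_tags(transcript):
--     """
--     Refine speaker tags by alternating speakers for consecutive utterances,
--     ensuring questions and answers are attributed to different speakers.
--
--     This method improves the accuracy of speaker attribution, especially
--     in question-answer scenarios.
--
--     Args:
--     transcript (list): The original transcript with potentially incorrect speaker tags.
--
--     Returns:
--     list: The refined transcript with corrected speaker tags.
--     """
--     refined_transcript = []
--     current_speaker = 1
--
--     for i, utterance in enumerate(transcript):
--         refined_utterance = utterance.copy()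
--
--         if utterance["text"].endswith("?"):
--             refined_utterance["speaker"] = f"speaker {current_speaker}"
--             refined_transcript.append(refined_utterance)
--             # Switch to the other speaker for the answer
--             current_speaker = 3 - current_speaker
--         else:
--             refined_utterance["speaker"] = f"speaker {current_speaker}"
--             refined_transcript.append(refined_utterance)
--
--             # Only switch speakers if the next utterance is not a continuation of the current one
--             if i + 1 < len(transcript) and not transcript[i + 1]["text"].startswith(
--                 ("and", "but", "or", "so")
--             ):
--                 current_speaker = 3 - current_speaker  # Alternate between 1 and 2
--
--     return refined_transcript
-- ===== SOURCE B (Python) =====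
-- def refine_speaker_tags(transcript):
--     conts = ("and", "but", "or", "so")
--     texts = [u["text"] for u in transcript]
--     switches = [a.endswith("?") or not b.startswith(conts) for a, b in zip(texts, texts[1:])]
--     if texts:
--         switches.append(texts[-1].endswith("?"))
--     refined = []
--     for i, utterance in enumerate(transcript):
--         num = 1 + sum(switches[:i]) % 2
--         refined_utterance = utterance.copy()
--         refined_utterance["speaker"] = f"speaker {num}"
--         refined.append(refined_utterance)
--     return refined
-- ===== Notes on version B (the rewrite author's own statement) =====
-- stated objective: alternative
-- what changed: Replaces A's single pass threading a current_speaker accumulator by a two-phase decomposition: first a switch table built by zipping each text with its successor (plus a final endswith-'?' entry), then each speaker number computed independently as 1 + (count of switches before that index) % 2.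
import Mathlib
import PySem

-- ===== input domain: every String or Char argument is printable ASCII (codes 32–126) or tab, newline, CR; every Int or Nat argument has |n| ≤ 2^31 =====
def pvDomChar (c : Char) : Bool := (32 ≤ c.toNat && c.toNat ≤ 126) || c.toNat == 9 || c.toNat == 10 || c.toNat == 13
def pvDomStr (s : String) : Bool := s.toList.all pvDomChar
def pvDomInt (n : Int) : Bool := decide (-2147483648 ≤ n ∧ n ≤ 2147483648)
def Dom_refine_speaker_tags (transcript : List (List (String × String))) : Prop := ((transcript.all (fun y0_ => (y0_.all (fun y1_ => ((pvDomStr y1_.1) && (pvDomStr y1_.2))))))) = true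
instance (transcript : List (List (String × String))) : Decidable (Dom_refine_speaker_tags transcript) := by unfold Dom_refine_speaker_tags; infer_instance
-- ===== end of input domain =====

-- B replaces A's threaded current-speaker accumulator by a precomputed switch table
-- and a per-index prefix-count parity (alternative decomposition, not faster).


-- ===== PORT A =====
-- A's for-loop over enumerate(transcript) with the lookahead transcript[i+1] becomes
-- structural recursion threading current_speaker, the lookahead reading the head of the rest
-- (i + 1 < len(transcript) ↔ rest ≠ []).  utterance["text"] is Dict.getD with default ""
-- (exact under Pre_, which requires every utterance to own the key "text").
def pvLoopA (cur : Int) : List (List (String × String)) → List (List (String × String))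
  | [] => []
  | u :: rest =>
    let ru := ((PySem.Dict.ofList u).insert "speaker" ("speaker " ++ PySem.Int.toStr cur)).items
    if PySem.Str.endswith ((PySem.Dict.ofList u).getD "text" "") "?" then
      ru :: pvLoopA (3 - cur) rest
    else
      match rest with
      | [] => ru :: pvLoopA cur []
      | v :: r =>
        if !(PySem.Str.startswith ((PySem.Dict.ofList v).getD "text" "") "and" ||
             PySem.Str.startswith ((PySem.Dict.ofList v).getD "text" "") "but" ||
             PySem.Str.startswith ((PySem.Dict.ofList v).getD "text" "") "or" ||
             PySem.Str.startswith ((PySem.Dict.ofList v).getD "text" "") "so") then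
          ru :: pvLoopA (3 - cur) (v :: r)
        else
          ru :: pvLoopA cur (v :: r)

def refine_speaker_tags (transcript : List (List (String × String))) : List (List (String × String)) :=
  pvLoopA 1 transcript

-- ===== PORT B =====
def pvStartsCont (s : String) : Bool :=
  PySem.Str.startswith s "and" || PySem.Str.startswith s "but" ||
  PySem.Str.startswith s "or" || PySem.Str.startswith s "so"

def refine_speaker_tags_alt (transcript : List (List (String × String))) : List (List (String × String)) :=
  let texts := transcript.map (fun u => (PySem.Dict.ofList u).getD "text" "")
  let sw0 := (texts.zip texts.tail).map (fun p => PySem.Str.endswith p.1 "?" || !pvStartsCont p.2)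
  let switches := if texts.isEmpty then sw0
                  else sw0 ++ [PySem.Str.endswith (PySem.List.pyGetD texts (-1) "") "?"]
  (PySem.List.enumerate transcript 0).map (fun iu =>
    let num : Int := 1 + PySem.Int.mod (((PySem.List.slice switches none (some iu.1)).countP (· = true) : Nat) : Int) 2
    ((PySem.Dict.ofList iu.2).insert "speaker" ("speaker " ++ PySem.Int.toStr num)).items)

-- ===== PRECONDITION & SPEC =====
-- Pre_ excludes exactly the inputs where the Python A raises KeyError: some utterance
-- has no "text" key (B raises there too).
def Pre_refine_speaker_tags (transcript : List (List (String × String))) : Prop :=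
  (transcript.all (fun u => u.any (fun p => p.1 == "text"))) = true
instance (transcript : List (List (String × String))) : Decidable (Pre_refine_speaker_tags transcript) := by unfold Pre_refine_speaker_tags; infer_instance
def pvWitness_refine_speaker_tags : (List (List (String × String))) := [[("text", "hi?")], [("text", "yes")]]

def Spec_refine_speaker_tags (transcript : List (List (String × String))) (out : List (List (String × String))) : Prop := out = refine_speaker_tags_alt transcript
instance (transcript : List (List (String × String))) (out : List (List (String × String))) : Decidable (Spec_refine_speaker_tags transcript out) := by unfold Spec_refine_speaker_tags; infer_instance

-- ===== CLAIM (what is proved, stated in full; the proofs are below) =====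
def Claim_equal_refine_speaker_tags : Prop := ∀ (transcript : List (List (String × String))), Dom_refine_speaker_tags transcript → Pre_refine_speaker_tags transcript → Spec_refine_speaker_tags transcript (refine_speaker_tags transcript)

-- ===== LEMMAS AND PROOFS =====

def pvTextOf (u : List (String × String)) : String := (PySem.Dict.ofList u).getD "text" ""

-- the refined utterance produced for u with speaker number c
def pvItem (u : List (String × String)) (c : Int) : List (String × String) :=
  ((PySem.Dict.ofList u).insert "speaker" ("speaker " ++ PySem.Int.toStr c)).items

-- structural form of B's switch table
def pvSw : List String → List Bool
  | [] => []
  | [t] => [PySem.Str.endswith t "?"]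
  | t :: t' :: r => (PySem.Str.endswith t "?" || !pvStartsCont t') :: pvSw (t' :: r)

-- the switch decision A makes after utterance u when rest remains
def pvSwU (u : List (String × String)) (rest : List (List (String × String))) : Bool :=
  PySem.Str.endswith (pvTextOf u) "?" ||
    (match rest with | [] => false | v :: _ => !pvStartsCont (pvTextOf v))

-- common recursive form: k = number of switches so far, speaker = 1 + k % 2
def pvG (k : Nat) : List (List (String × String)) → List (List (String × String))
  | [] => []
  | u :: rest => pvItem u (1 + ((k % 2 : Nat) : Int)) :: pvG (k + (if pvSwU u rest then 1 else 0)) rest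

theorem pvSw_cons (u : List (String × String)) (rest : List (List (String × String))) :
    pvSw ((u :: rest).map pvTextOf) = pvSwU u rest :: pvSw (rest.map pvTextOf) := by
  cases rest with
  | nil => simp [pvSw, pvSwU]
  | cons v r => simp [pvSw, pvSwU, pvStartsCont]

theorem pvLoopA_cons (cur : Int) (u : List (String × String)) (rest : List (List (String × String))) :
    pvLoopA cur (u :: rest) =
    (let ru := ((PySem.Dict.ofList u).insert "speaker" ("speaker " ++ PySem.Int.toStr cur)).items
    if PySem.Str.endswith ((PySem.Dict.ofList u).getD "text" "") "?" then
      ru :: pvLoopA (3 - cur) rest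
    else
      match rest with
      | [] => ru :: pvLoopA cur []
      | v :: r =>
        if !(PySem.Str.startswith ((PySem.Dict.ofList v).getD "text" "") "and" ||
             PySem.Str.startswith ((PySem.Dict.ofList v).getD "text" "") "but" ||
             PySem.Str.startswith ((PySem.Dict.ofList v).getD "text" "") "or" ||
             PySem.Str.startswith ((PySem.Dict.ofList v).getD "text" "") "so") then
          ru :: pvLoopA (3 - cur) (v :: r)
        else
          ru :: pvLoopA cur (v :: r)) := by
  rw [pvLoopA.eq_def]

theorem pvLoopA_eq_pvG (l : List (List (String × String))) (k : Nat) :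
    pvLoopA (1 + ((k % 2 : Nat) : Int)) l = pvG k l := by
  induction l generalizing k with
  | nil => rfl
  | cons u rest ih =>
    have hswap : (3 - (1 + ((k % 2 : Nat) : Int))) = 1 + (((k + 1) % 2 : Nat) : Int) := by omega
    rw [pvLoopA_cons]
    simp only [pvG, pvItem, pvSwU, pvTextOf]
    by_cases hq : PySem.Str.endswith ((PySem.Dict.ofList u).getD "text" "") "?"
    · simp only [hq, if_true, Bool.true_or, hswap, ih]
    · rw [Bool.not_eq_true] at hq
      simp only [hq, Bool.false_or, Bool.false_eq_true, if_false]
      cases rest with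
      | nil => simpa using ih k
      | cons v r =>
        simp only [pvStartsCont]
        by_cases hs : (PySem.Str.startswith ((PySem.Dict.ofList v).getD "text" "") "and" ||
            PySem.Str.startswith ((PySem.Dict.ofList v).getD "text" "") "but" ||
            PySem.Str.startswith ((PySem.Dict.ofList v).getD "text" "") "or" ||
            PySem.Str.startswith ((PySem.Dict.ofList v).getD "text" "") "so") = true
        · simp only [hs, Bool.not_true, Bool.false_eq_true, if_false]
          simpa using ih k
        · rw [Bool.not_eq_true] at hs
          simp only [hs, Bool.not_false, if_true, hswap]
          exact congrArg _ (ih (k + 1))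

theorem pvModTwo (n : Nat) : PySem.Int.mod (n : Int) 2 = ((n % 2 : Nat) : Int) := by
  rw [PySem.Int.mod_eq_emod_of_pos (by omega)]; omega

theorem pvB_eq_pvG (l : List (List (String × String))) (pre : List Bool) :
    (PySem.List.enumerate l (pre.length : Int)).map (fun iu =>
        pvItem iu.2 (1 + PySem.Int.mod (((PySem.List.slice (pre ++ pvSw (l.map pvTextOf)) none
          (some iu.1)).countP (· = true) : Nat) : Int) 2))
      = pvG (pre.countP (· = true)) l := by
  induction l generalizing pre with
  | nil => simp [PySem.List.enumerate_nil, pvG]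
  | cons u rest ih =>
    rw [PySem.List.enumerate_cons, pvSw_cons]
    have hsplit : pre ++ (pvSwU u rest :: pvSw (rest.map pvTextOf))
        = (pre ++ [pvSwU u rest]) ++ pvSw (rest.map pvTextOf) := by simp
    rw [List.map_cons, hsplit]
    have hhead : PySem.List.slice ((pre ++ [pvSwU u rest]) ++ pvSw (rest.map pvTextOf)) none
        (some (pre.length : Int)) = pre := by
      rw [PySem.List.slice_to_natCast]
      rw [List.append_assoc]
      simp
    have htail := ih (pre ++ [pvSwU u rest])
    have hlen : ((pre ++ [pvSwU u rest]).length : Int) = (pre.length : Int) + 1 := by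
      simp
    rw [hlen] at htail
    rw [htail, pvG]
    congr 1
    · rw [hhead, pvModTwo]
    · congr 1
      simp only [List.countP_append, List.countP_cons, List.countP_nil]
      cases h : pvSwU u rest <;> simp

theorem pvSwitches_eq (texts : List String) :
    (if texts.isEmpty
      then (texts.zip texts.tail).map (fun p => PySem.Str.endswith p.1 "?" || !pvStartsCont p.2)
      else (texts.zip texts.tail).map (fun p => PySem.Str.endswith p.1 "?" || !pvStartsCont p.2)
        ++ [PySem.Str.endswith (PySem.List.pyGetD texts (-1) "") "?"])
    = pvSw texts := by
  induction texts with
  | nil => simp [pvSw]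
  | cons t ts ih =>
    cases ts with
    | nil =>
      have h1 : PySem.List.pyGetD [t] (-1) "" = t := by simp [pysem]
      simp [pvSw, h1]
    | cons t' r =>
      have hlast : PySem.List.pyGetD (t :: t' :: r) (-1) ""
          = PySem.List.pyGetD (t' :: r) (-1) "" := by
        simp [pysem]
      simp only [List.isEmpty_cons, if_false, Bool.false_eq_true] at ih ⊢
      rw [pvSw, ← ih]
      simp [hlast]

theorem pvB_zero (l : List (List (String × String))) :
    (PySem.List.enumerate l 0).map (fun iu =>
        pvItem iu.2 (1 + PySem.Int.mod (((PySem.List.slice (pvSw (l.map pvTextOf)) none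
          (some iu.1)).countP (· = true) : Nat) : Int) 2))
      = pvG 0 l := by
  simpa using pvB_eq_pvG l []

-- ===== VERDICT (by name: the statement is the Claim_ definition above) =====
theorem refine_speaker_tags_spec : Claim_equal_refine_speaker_tags := by
  intro transcript _ _
  show refine_speaker_tags transcript = refine_speaker_tags_alt transcript
  have hB : refine_speaker_tags_alt transcript =
      (PySem.List.enumerate transcript 0).map (fun iu =>
        pvItem iu.2 (1 + PySem.Int.mod (((PySem.List.slice
          (if (transcript.map pvTextOf).isEmpty
            then ((transcript.map pvTextOf).zip (transcript.map pvTextOf).tail).map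
                  (fun p => PySem.Str.endswith p.1 "?" || !pvStartsCont p.2)
            else ((transcript.map pvTextOf).zip (transcript.map pvTextOf).tail).map
                  (fun p => PySem.Str.endswith p.1 "?" || !pvStartsCont p.2)
              ++ [PySem.Str.endswith (PySem.List.pyGetD (transcript.map pvTextOf) (-1) "") "?"])
          none (some iu.1)).countP (· = true) : Nat) : Int) 2)) := rfl
  rw [hB, pvSwitches_eq]
  show pvLoopA 1 transcript = _
  rw [pvB_zero]
  simpa using pvLoopA_eq_pvG transcript 0
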